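-- pv_equiv track=rewrite | github.com/Ananth1122/CineMind | cinemind.py | fix_subheadings
-- ===== SOURCE A (Python) =====
-- def fix_subheadings(text):
--     subheadings = [
--         "Themes:", "Patterns:", "Logline:", "Synopsis:", "Themes & Patterns Hit:",
--         "Box Office Appeal:", "Box Office Potential:", "Box Office Success:"
--     ]
--     for sh in subheadings:
--         text = text.replace(sh, f"\n{sh}")  # Insert newline before subheading
--     return text
-- ===== SOURCE B (Python) =====
-- def fix_subheadings(text):
--     subheadings = [
--         "Themes:", "Patterns:", "Logline:", "Synopsis:", "Themes & Patterns Hit:",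
--         "Box Office Appeal:", "Box Office Potential:", "Box Office Success:"
--     ]
--     # Single left-to-right scan: at each position try the subheadings; on a match
--     # emit "\n" + subheading and jump past it, otherwise copy one character.
--     out = []
--     i = 0
--     n = len(text)
--     while i < n:
--         for sh in subheadings:
--             if text.startswith(sh, i):
--                 out.append("\n")
--                 out.append(sh)
--                 i += len(sh)
--                 break
--         else:
--             out.append(text[i])
--             i += 1
--     return "".join(out)
-- ===== Notes on version B (the rewrite author's own statement) =====
-- stated objective: alternative
-- what changed: A makes eight sequential full-string str.replace passes (one per subheading); B makes a single left-to-right scan over the text that tries the subheadings at each position, emitting a newline plus the matched subheading and jumping past it.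
import Mathlib
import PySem

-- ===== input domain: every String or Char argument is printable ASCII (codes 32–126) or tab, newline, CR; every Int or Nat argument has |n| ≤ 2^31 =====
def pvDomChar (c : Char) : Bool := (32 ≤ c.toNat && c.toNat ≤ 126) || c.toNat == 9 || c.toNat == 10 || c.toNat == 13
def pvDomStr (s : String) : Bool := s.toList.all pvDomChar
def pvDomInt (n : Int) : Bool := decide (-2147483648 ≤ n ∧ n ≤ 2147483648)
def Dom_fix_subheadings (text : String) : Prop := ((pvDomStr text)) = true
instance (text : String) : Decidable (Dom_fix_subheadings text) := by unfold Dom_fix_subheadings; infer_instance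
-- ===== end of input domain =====

-- B replaces A's eight sequential full-string replace passes by one left-to-right
-- scan that tries the subheadings at each position (alternative; equal result proved).

-- ===== PORT A =====
def fix_subheadings (text : String) : String :=
  let subheadings : List String :=
    ["Themes:", "Patterns:", "Logline:", "Synopsis:", "Themes & Patterns Hit:",
     "Box Office Appeal:", "Box Office Potential:", "Box Office Success:"]
  subheadings.foldl (fun t sh => PySem.Str.replace t sh ("\n" ++ sh)) text

-- ===== PORT B =====
def pvSubs : List (List Char) :=
  ["Themes:".toList, "Patterns:".toList, "Logline:".toList, "Synopsis:".toList,
   "Themes & Patterns Hit:".toList, "Box Office Appeal:".toList,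
   "Box Office Potential:".toList, "Box Office Success:".toList]

-- cited by altGo's decreasing_by (termination of the scan step)
theorem pvSubs_ne_nil : ∀ q ∈ pvSubs, q ≠ [] := by decide

-- B's scan: at each position, first subheading that starts here (Python's
-- for/startswith/break) is emitted with a leading newline and skipped over.
def altGo : List Char → List Char
  | [] => []
  | c :: t =>
    match h : pvSubs.find? (fun p => p.isPrefixOf (c :: t)) with
    | some p => '\n' :: (p ++ altGo (List.drop p.length (c :: t)))
    | none => c :: altGo t
termination_by l => l.length
decreasing_by
  · have hne := pvSubs_ne_nil p (List.mem_of_find?_eq_some h)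
    have hpos : 0 < p.length := by cases p <;> simp_all
    simp only [List.length_drop, List.length_cons]
    omega
  · simp

def fix_subheadings_alt (text : String) : String := String.ofList (altGo text.toList)

-- ===== PRECONDITION & SPEC =====
def Spec_fix_subheadings (text : String) (out : String) : Prop := out = fix_subheadings_alt text
instance (text : String) (out : String) : Decidable (Spec_fix_subheadings text out) := by unfold Spec_fix_subheadings; infer_instance

-- ===== CLAIM (what is proved, stated in full; the proofs are below) =====
def Claim_equal_fix_subheadings : Prop := ∀ (text : String), Dom_fix_subheadings text → Spec_fix_subheadings text (fix_subheadings text)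

-- ===== LEMMAS AND PROOFS =====

-- structural version of Python's str.replace for a nonempty pattern
def replaceL (p new : List Char) : List Char → List Char
  | [] => []
  | c :: t =>
    if h : p ≠ [] ∧ p.isPrefixOf (c :: t) then
      new ++ replaceL p new (List.drop p.length (c :: t))
    else c :: replaceL p new t
termination_by l => l.length
decreasing_by
  · have hpos : 0 < p.length := by cases p <;> simp_all
    simp only [List.length_drop, List.length_cons]
    omega
  · simp

theorem go_eq (old new : List Char) (hold : old ≠ []) :
    ∀ (fuel : Nat) (l acc : List Char), l.length ≤ fuel →
      PySem.Chars.replace.go old new fuel l acc = acc.reverse ++ replaceL old new l := by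
  intro fuel
  induction fuel with
  | zero =>
    intro l acc h
    have hl : l = [] := by cases l <;> simp_all
    subst hl
    simp [PySem.Chars.replace.go, replaceL]
  | succ n ih =>
    intro l acc h
    cases l with
    | nil => simp [PySem.Chars.replace.go, replaceL]
    | cons c t =>
      by_cases hp : old.isPrefixOf (c :: t)
      · have hpos : 0 < old.length := by cases old <;> simp_all
        rw [show PySem.Chars.replace.go old new (n+1) (c :: t) acc
              = PySem.Chars.replace.go old new n (List.drop old.length (c :: t)) (new.reverse ++ acc) from by
            simp [PySem.Chars.replace.go, hp]]
        rw [ih _ _ (by simp only [List.length_drop, List.length_cons] at *; omega)]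
        rw [replaceL]
        simp [hp, hold]
      · rw [show PySem.Chars.replace.go old new (n+1) (c :: t) acc
              = PySem.Chars.replace.go old new n t (c :: acc) from by
            simp [PySem.Chars.replace.go, hp]]
        rw [ih _ _ (by simp at h ⊢; omega)]
        rw [replaceL]
        simp [hp]

theorem replace_eq_replaceL (s old new : List Char) (hold : old ≠ []) :
    PySem.Chars.replace s old new = replaceL old new s := by
  unfold PySem.Chars.replace
  have : old.isEmpty = false := by cases old <;> simp_all
  rw [this]
  simpa using go_eq old new hold s.length s [] le_rfl

theorem str_replace_eq (s o n : String) (ho : o.toList ≠ []) :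
    PySem.Str.replace s o n = String.ofList (replaceL o.toList n.toList s.toList) := by
  unfold PySem.Str.replace
  rw [replace_eq_replaceL _ _ _ ho]

theorem replaceL_nil_input (p new : List Char) : replaceL p new [] = [] := by
  rw [replaceL]

theorem replaceL_front (p new rest : List Char) (hp : p ≠ []) :
    replaceL p new (p ++ rest) = new ++ replaceL p new rest := by
  cases p with
  | nil => exact absurd rfl hp
  | cons o os =>
    rw [show (o :: os) ++ rest = o :: (os ++ rest) from rfl, replaceL]
    have hpre : (o :: os).isPrefixOf (o :: (os ++ rest)) = true := by
      rw [List.isPrefixOf_iff_prefix]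
      exact ⟨rest, rfl⟩
    rw [dif_pos ⟨by simp, hpre⟩]
    congr 1
    congr 1
    rw [show o :: (os ++ rest) = (o :: os) ++ rest from rfl]
    simp

theorem replaceL_cons_of_not_prefix {p : List Char} (new : List Char) {c : Char} {t : List Char}
    (hnp : ¬ p <+: (c :: t)) :
    replaceL p new (c :: t) = c :: replaceL p new t := by
  rw [replaceL, dif_neg]
  rintro ⟨-, hpre⟩
  exact hnp (List.isPrefixOf_iff_prefix.1 hpre)

theorem replaceL_skip (p new : List Char) :
    ∀ (b rest : List Char),
      (∀ k, k < b.length → ¬ p <+: List.drop k b ∧ ¬ List.drop k b <+: p) →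
      replaceL p new (b ++ rest) = b ++ replaceL p new rest := by
  intro b
  induction b with
  | nil => intro rest _; simp
  | cons c b' ih =>
    intro rest h
    have h0 := h 0 (by simp)
    simp only [List.drop_zero] at h0
    have hnp : ¬ p <+: (c :: (b' ++ rest)) := by
      intro hpre
      rcases List.prefix_or_prefix_of_prefix hpre (⟨rest, rfl⟩ : (c :: b') <+: (c :: b') ++ rest) with h1 | h1
      · exact h0.1 h1
      · exact h0.2 h1
    rw [show (c :: b') ++ rest = c :: (b' ++ rest) from rfl,
        replaceL_cons_of_not_prefix new hnp,
        ih rest (fun k hk => by simpa using h (k+1) (by simpa using Nat.succ_lt_succ hk))]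
    rfl

theorem nlfree_prefix (p r : List Char) :
    ∀ (n : Nat) (Z w : List Char), Z.length ≤ n → '\n' ∉ w →
      w <+: replaceL p ('\n' :: r) Z → w <+: Z := by
  intro n
  induction n with
  | zero =>
    intro Z w hZ hw hpre
    have : Z = [] := by cases Z <;> simp_all
    subst this
    rw [replaceL_nil_input] at hpre
    simpa using hpre
  | succ n ih =>
    intro Z w hZ hw hpre
    cases Z with
    | nil =>
      rw [replaceL_nil_input] at hpre
      simpa using hpre
    | cons c t =>
      rw [replaceL] at hpre
      split at hpre
      case isTrue hc =>
        cases w with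
        | nil => exact List.nil_prefix
        | cons w0 ws =>
          rcases (List.cons_prefix_cons).1 hpre with ⟨rfl, -⟩
          simp at hw
      case isFalse hc =>
        cases w with
        | nil => exact List.nil_prefix
        | cons w0 ws =>
          rcases (List.cons_prefix_cons).1 hpre with ⟨rfl, hws⟩
          have : ws <+: t := ih t ws (by simp at hZ; omega) (by simp at hw; tauto) hws
          exact List.cons_prefix_cons.2 ⟨rfl, this⟩

-- A's algorithm, abstracted over the subheading list (at the char-list level)
def compR (subs : List (List Char)) (l : List Char) : List Char :=
  subs.foldl (fun acc p => replaceL p ('\n' :: p) acc) l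

theorem compR_nil (subs : List (List Char)) : compR subs [] = [] := by
  induction subs with
  | nil => rfl
  | cons q rest ih =>
    simp only [compR, List.foldl_cons, replaceL_nil_input]
    exact ih

theorem compR_cons (subs : List (List Char)) (hnl : ∀ q ∈ subs, '\n' ∉ q)
    (c : Char) (t : List Char) (hm : ∀ q ∈ subs, ¬ q <+: (c :: t)) :
    ∀ u, (∀ w, '\n' ∉ w → w <+: u → w <+: t) →
      compR subs (c :: u) = c :: compR subs u := by
  induction subs with
  | nil => intro u _; rfl
  | cons q rest ih =>
    intro u hu
    have hq : ¬ q <+: (c :: u) := by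
      intro hpre
      cases q with
      | nil => exact hm [] (by simp) List.nil_prefix
      | cons q0 qs =>
        rcases (List.cons_prefix_cons).1 hpre with ⟨rfl, hqs⟩
        have hnlq := hnl (q0 :: qs) (by simp)
        have hqt : qs <+: t := hu qs (by simp at hnlq; tauto) hqs
        exact hm (q0 :: qs) (by simp) (List.cons_prefix_cons.2 ⟨rfl, hqt⟩)
    have step : compR (q :: rest) (c :: u) = compR rest (c :: replaceL q ('\n' :: q) u) := by
      simp only [compR, List.foldl_cons, replaceL_cons_of_not_prefix _ hq]
    rw [step,
        ih (fun p hp => hnl p (by simp [hp])) (fun p hp => hm p (by simp [hp]))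
           (replaceL q ('\n' :: q) u)
           (fun w hw hpre => hu w hw (nlfree_prefix q q u.length u w le_rfl hw hpre))]
    rfl

theorem compR_block (subs : List (List Char)) (b : List Char)
    (h : ∀ q ∈ subs, ∀ k, k < b.length → ¬ q <+: List.drop k b ∧ ¬ List.drop k b <+: q) :
    ∀ X, compR subs (b ++ X) = b ++ compR subs X := by
  induction subs with
  | nil => intro X; rfl
  | cons q rest ih =>
    intro X
    have step : compR (q :: rest) (b ++ X) = compR rest (b ++ replaceL q ('\n' :: q) X) := by
      simp only [compR, List.foldl_cons, replaceL_skip q _ b X (h q (by simp))]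
    rw [step, ih (fun p hp => h p (by simp [hp]))]
    rfl

theorem pvSubs_nl_free : ∀ q ∈ pvSubs, '\n' ∉ q := by decide

theorem pvSubs_nodup : pvSubs.Nodup := by decide

theorem pvSubs_pf :
    ∀ a ∈ pvSubs, ∀ b ∈ pvSubs, a ≠ b →
      ∀ k, k < b.length → ¬ a <+: List.drop k b ∧ ¬ List.drop k b <+: a := by decide

theorem compR_eq_altGo : ∀ (n : Nat) (l : List Char), l.length ≤ n → compR pvSubs l = altGo l := by
  intro n
  induction n with
  | zero =>
    intro l hl
    have : l = [] := by cases l <;> simp_all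
    subst this
    rw [compR_nil, altGo]
  | succ n ih =>
    intro l hl
    cases l with
    | nil => rw [compR_nil, altGo]
    | cons c t =>
      cases hfind : pvSubs.find? (fun p => p.isPrefixOf (c :: t)) with
      | none =>
        have hm : ∀ q ∈ pvSubs, ¬ q <+: (c :: t) := by
          intro q hq hpre
          have := List.find?_eq_none.1 hfind q hq
          simp only [List.isPrefixOf_iff_prefix] at this
          exact this hpre
        rw [compR_cons pvSubs pvSubs_nl_free c t hm t (fun _ _ h => h)]
        rw [show altGo (c :: t) = c :: altGo t from by rw [altGo, hfind]]
        rw [ih t (by simp at hl; omega)]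
      | some p =>
        obtain ⟨hpb, before, after, hsplit, hbefore⟩ := List.find?_eq_some_iff_append.1 hfind
        have hpre : p <+: c :: t := List.isPrefixOf_iff_prefix.1 hpb
        have hp_mem : p ∈ pvSubs := by rw [hsplit]; simp
        have hpne : p ≠ [] := pvSubs_ne_nil p hp_mem
        have hppos : 0 < p.length := by cases p <;> simp_all
        obtain ⟨rest, hrest⟩ := hpre
        have hdrop : List.drop p.length (c :: t) = rest := by
          rw [← hrest, List.drop_left]
        have hnd := pvSubs_nodup
        rw [hsplit, List.nodup_append] at hnd
        have hq_before : ∀ q ∈ before, q ≠ p := by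
          intro q hq he
          exact hnd.2.2 q hq p (by simp) he
        have hq_after : ∀ q ∈ after, q ≠ p := by
          intro q hq he
          have := hnd.2.1
          rw [List.nodup_cons] at this
          exact this.1 (he ▸ hq)
        have hmem_before : ∀ q ∈ before, q ∈ pvSubs := by
          intro q hq; rw [hsplit]; simp [hq]
        have hmem_after : ∀ q ∈ after, q ∈ pvSubs := by
          intro q hq; rw [hsplit]; simp [hq]
        have hyp1 : ∀ q ∈ before, ∀ k, k < p.length → ¬ q <+: List.drop k p ∧ ¬ List.drop k p <+: q :=
          fun q hq => pvSubs_pf q (hmem_before q hq) p hp_mem (hq_before q hq)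
        have hyp2 : ∀ q ∈ after, ∀ k, k < ('\n' :: p).length →
            ¬ q <+: List.drop k ('\n' :: p) ∧ ¬ List.drop k ('\n' :: p) <+: q := by
          intro q hq k hk
          have hqm : q ∈ pvSubs := hmem_after q hq
          have hqnl : '\n' ∉ q := pvSubs_nl_free q hqm
          cases k with
          | zero =>
            constructor
            · intro hp2
              cases q with
              | nil => exact pvSubs_ne_nil [] hqm rfl
              | cons q0 qs =>
                rcases (List.cons_prefix_cons).1 hp2 with ⟨rfl, -⟩
                simp at hqnl
            · intro hp2
              exact hqnl (hp2.subset (by simp))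
          | succ k =>
            simp only [List.drop_succ_cons]
            exact pvSubs_pf q hqm p hp_mem (hq_after q hq) k (by simp at hk; omega)
        have key : compR pvSubs (c :: t) = '\n' :: p ++ compR pvSubs rest := by
          rw [← hrest, hsplit]
          simp only [compR, List.foldl_append, List.foldl_cons]
          rw [show List.foldl (fun acc q => replaceL q ('\n' :: q) acc) (p ++ rest) before
                = compR before (p ++ rest) from rfl]
          rw [compR_block before p hyp1 rest]
          rw [replaceL_front p ('\n' :: p) _ hpne]
          rw [show List.foldl (fun acc q => replaceL q ('\n' :: q) acc)
                (('\n' :: p) ++ replaceL p ('\n' :: p) (compR before rest)) after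
                = compR after (('\n' :: p) ++ replaceL p ('\n' :: p) (compR before rest)) from rfl]
          rw [compR_block after ('\n' :: p) hyp2]
          simp [compR]
        rw [key]
        rw [show altGo (c :: t) = '\n' :: (p ++ altGo (List.drop p.length (c :: t))) from by
          rw [altGo, hfind]]
        rw [hdrop]
        rw [ih rest (by
          have : (c :: t).length = p.length + rest.length := by rw [← hrest]; simp
          simp at this hl ⊢
          omega)]
        rfl

theorem fold_bridge :
    ∀ (subs : List String), (∀ s ∈ subs, s.toList ≠ []) → ∀ (t : String),
      subs.foldl (fun acc sh => PySem.Str.replace acc sh ("\n" ++ sh)) t =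
        String.ofList (compR (subs.map String.toList) t.toList) := by
  intro subs
  induction subs with
  | nil => intro _ t; simp [compR, String.ofList_toList]
  | cons s rest ih =>
    intro hne t
    simp only [List.foldl_cons, List.map_cons]
    rw [ih (fun q hq => hne q (by simp [hq]))]
    congr 1
    simp only [compR, List.foldl_cons]
    congr 1
    rw [str_replace_eq t s ("\n" ++ s) (hne s (by simp)), String.toList_ofList]
    congr 1
    rw [String.toList_append]
    rfl

-- ===== VERDICT (by name: the statement is the Claim_ definition above) =====
theorem fix_subheadings_spec : Claim_equal_fix_subheadings := by
  intro text _
  unfold Spec_fix_subheadings fix_subheadings fix_subheadings_alt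
  rw [fold_bridge _ (by decide) text]
  rw [show ( ["Themes:", "Patterns:", "Logline:", "Synopsis:", "Themes & Patterns Hit:",
     "Box Office Appeal:", "Box Office Potential:", "Box Office Success:"] : List String).map String.toList = pvSubs from rfl]
  rw [compR_eq_altGo text.toList.length text.toList le_rfl]
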